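-- pv_equiv track=rewrite | github.com/AsherThomasBabu/AlgoExpert | Arrays/Trapping-Rain-Water/soluton.py | trapRainWater
-- ===== SOURCE A (Python) =====
-- def trapRainWater(arr, n):
--
--     result = 0
--
--     for i in range(1, n-1):
--         left = arr[i]
--         for j in range(i):
--                 left = max(left, arr[j])
--
--         right = arr[i]
--         for j in range(i+1, n):
--             right = max(right, arr[j])
--
--         leftover = (min(left, right)-arr[i])
--         result += leftover
--
--     return result
-- ===== SOURCE B (Python) =====
-- def trapRainWater(arr, n):
--     if n < 3:
--         return 0
--     a = arr[:n]
--     left = []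
--     m = a[0]
--     for x in a:
--         m = max(m, x)
--         left.append(m)
--     right_rev = []
--     m = a[-1]
--     for x in reversed(a):
--         m = max(m, x)
--         right_rev.append(m)
--     right = right_rev[::-1]
--     total = 0
--     for i in range(1, n - 1):
--         total += min(left[i], right[i]) - a[i]
--     return total
-- ===== Notes on version B (the rewrite author's own statement) =====
-- stated objective: faster
-- what changed: Replaced the quadratic per-index rescan for left/right maxima by two O(n) prefix/suffix maximum sweeps followed by one summation pass.
import Mathlib
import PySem

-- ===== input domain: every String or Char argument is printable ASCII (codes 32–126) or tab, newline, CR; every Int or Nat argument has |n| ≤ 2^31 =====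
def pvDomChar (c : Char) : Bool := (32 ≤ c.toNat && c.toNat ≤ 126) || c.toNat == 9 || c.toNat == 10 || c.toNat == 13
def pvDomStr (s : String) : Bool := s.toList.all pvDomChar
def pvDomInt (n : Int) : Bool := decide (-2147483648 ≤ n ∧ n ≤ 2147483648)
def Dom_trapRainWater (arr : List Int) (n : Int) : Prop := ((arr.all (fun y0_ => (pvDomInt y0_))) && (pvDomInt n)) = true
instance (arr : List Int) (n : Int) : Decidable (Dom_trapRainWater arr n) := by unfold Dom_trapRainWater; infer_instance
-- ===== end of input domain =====

-- B replaces A's quadratic per-index rescans by two linear prefix/suffix maximum sweeps.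

-- ===== PORT A =====
def trapRainWater (arr : List Int) (n : Int) : Int :=
  (PySem.List.pyRange 1 (n - 1) 1).foldl (fun result i =>
    let left := (PySem.List.pyRange 0 i 1).foldl
      (fun l j => max l (PySem.List.pyGetD arr j 0)) (PySem.List.pyGetD arr i 0)
    let right := (PySem.List.pyRange (i + 1) n 1).foldl
      (fun r j => max r (PySem.List.pyGetD arr j 0)) (PySem.List.pyGetD arr i 0)
    result + (min left right - PySem.List.pyGetD arr i 0)) 0

-- ===== PORT B =====
def trapRainWater_alt (arr : List Int) (n : Int) : Int :=
  if n < 3 then 0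
  else
    let a := PySem.List.slice arr none (some n)
    let left := (a.foldl (fun p x => (p.1 ++ [max p.2 x], max p.2 x))
      (([] : List Int), PySem.List.pyGetD a 0 0)).1
    let rightRev := (a.reverse.foldl (fun p x => (p.1 ++ [max p.2 x], max p.2 x))
      (([] : List Int), PySem.List.pyGetD a (-1) 0)).1
    let right := rightRev.reverse
    (PySem.List.pyRange 1 (n - 1) 1).foldl (fun t i =>
      t + (min (PySem.List.pyGetD left i 0) (PySem.List.pyGetD right i 0)
           - PySem.List.pyGetD a i 0)) 0

-- ===== PRECONDITION & SPEC =====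
-- Pre_ excludes exactly the inputs where A raises IndexError: 3 ≤ n but arr has fewer than n elements.
def Pre_trapRainWater (arr : List Int) (n : Int) : Prop := n ≤ arr.length ∨ n < 3
instance (arr : List Int) (n : Int) : Decidable (Pre_trapRainWater arr n) := by
  unfold Pre_trapRainWater; infer_instance
def pvWitness_trapRainWater : List Int × Int := ([3, 0, 2], 3)

def Spec_trapRainWater (arr : List Int) (n : Int) (out : Int) : Prop := out = trapRainWater_alt arr n
instance (arr : List Int) (n : Int) (out : Int) : Decidable (Spec_trapRainWater arr n out) := by
  unfold Spec_trapRainWater; infer_instance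

-- ===== CLAIM (what is proved, stated in full; the proofs are below) =====
def Claim_equal_trapRainWater : Prop := ∀ (arr : List Int) (n : Int),
  Dom_trapRainWater arr n → Pre_trapRainWater arr n →
  Spec_trapRainWater arr n (trapRainWater arr n)

-- ===== LEMMAS AND PROOFS =====

-- fm l x = l.foldl max x, the running maximum both programs maintain
def fm (l : List Int) (x : Int) : Int := l.foldl max x

theorem fm_init (l : List Int) (x y : Int) : fm l (max x y) = max x (fm l y) := by
  induction l generalizing y with
  | nil => rfl
  | cons c t ih =>
    show fm t (max (max x y) c) = max x (fm t (max y c))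
    rw [max_assoc]; exact ih (max y c)

theorem fm_cons (c : Int) (t : List Int) (x : Int) : fm (c :: t) x = max x (fm t c) := by
  show fm t (max x c) = _
  exact fm_init t x c

theorem fm_append (l1 l2 : List Int) (x : Int) : fm (l1 ++ l2) x = fm l2 (fm l1 x) := by
  simp [fm]

theorem le_fm (l : List Int) (x : Int) : x ≤ fm l x := by
  induction l generalizing x with
  | nil => exact le_refl x
  | cons c t ih => exact le_trans (le_max_left x c) (ih (max x c))

theorem fm_absorb (l : List Int) (x y : Int) (h : y ∈ l) : max y (fm l x) = fm l x := by
  induction l generalizing x with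
  | nil => simp at h
  | cons c t ih =>
    rcases List.mem_cons.mp h with hc | ht
    · subst hc
      show max y (fm t (max x y)) = fm t (max x y)
      exact max_eq_right (le_trans (le_max_right x y) (le_fm t (max x y)))
    · exact ih (max x c) ht

theorem fm_reverse (l : List Int) (x : Int) : fm l.reverse x = fm l x := by
  induction l generalizing x with
  | nil => rfl
  | cons c t ih =>
    rw [List.reverse_cons, fm_append, fm_cons]
    show max (fm t.reverse x) c = fm t (max x c)
    rw [ih, max_comm x c, fm_init, max_comm]

-- the prefix-maximum list B builds by appending
def scanSpec (m : Int) : List Int → List Int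
  | [] => []
  | x :: t => (max m x) :: scanSpec (max m x) t

theorem scanSpec_length (m : Int) (l : List Int) : (scanSpec m l).length = l.length := by
  induction l generalizing m with
  | nil => rfl
  | cons c t ih => simp [scanSpec, ih]

theorem scan_foldl (l : List Int) (acc : List Int) (m : Int) :
    l.foldl (fun p x => (p.1 ++ [max p.2 x], max p.2 x)) (acc, m)
      = (acc ++ scanSpec m l, fm l m) := by
  induction l generalizing acc m with
  | nil => simp [scanSpec, fm]
  | cons c t ih =>
    show t.foldl _ (acc ++ [max m c], max m c) = _
    rw [ih]
    simp [scanSpec, fm]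

theorem scan_get (l : List Int) (m : Int) (k : Nat) (hk : k < l.length) :
    (scanSpec m l)[k]? = some (fm (l.take (k + 1)) m) := by
  induction l generalizing m k with
  | nil => simp at hk
  | cons c t ih =>
    cases k with
    | zero => simp [scanSpec, fm]
    | succ k' =>
      simp only [scanSpec, List.getElem?_cons_succ, List.take_succ_cons]
      rw [ih (max m c) k' (by simpa using hk)]
      rfl

theorem map_getD_range_off (a : List Int) (c k : Nat) (h : c + k ≤ a.length) :
    (List.range k).map (fun t => a.getD (c + t) 0) = (a.drop c).take k := by
  apply List.ext_getElem
  · simp; omega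
  · intro j h1 h2
    simp only [List.getElem_map, List.getElem_range, List.getElem_take, List.getElem_drop]
    rw [List.getD_eq_getElem a 0 (by simp at h1 ⊢; omega)]

theorem fm_take_shift (a : List Int) (k : Nat) (h : k < a.length) :
    fm (a.take (k + 1)) (a.getD 0 0) = fm (a.take k) (a.getD k 0) := by
  cases a with
  | nil => simp at h
  | cons a0 rest =>
    cases k with
    | zero => simp [fm]
    | succ k' =>
      have hk' : k' < rest.length := by simpa using h
      simp only [List.take_succ_cons, List.getD_cons_zero, List.getD_cons_succ]
      rw [fm_cons, fm_cons]
      rw [show rest.take (k' + 1) = rest.take k' ++ [rest[k']] by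
        rw [← List.concat_eq_append, List.take_concat_get], fm_append]
      rw [List.getD_eq_getElem rest 0 hk']
      show max a0 (max (fm (rest.take k') a0) rest[k']) = max rest[k'] (fm (rest.take k') a0)
      rw [max_comm (fm (rest.take k') a0) rest[k']]
      exact max_eq_right (le_trans (le_fm _ _) (le_max_right _ _))

theorem trapRainWater_main : ∀ (arr : List Int) (n : Int),
    Pre_trapRainWater arr n → trapRainWater arr n = trapRainWater_alt arr n := by
  intro arr n hpre
  by_cases hn : n < 3
  · have hr : PySem.List.pyRange 1 (n - 1) 1 = [] :=
      PySem.List.pyRange_one_eq_nil (by omega)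
    simp [trapRainWater, trapRainWater_alt, hr, hn]
  · rw [not_lt] at hn
    have hlen : n ≤ arr.length := by
      rcases hpre with h | h
      · exact h
      · omega
    obtain ⟨N, rfl⟩ : ∃ N : Nat, n = (N : Int) :=
      ⟨n.toNat, (Int.toNat_of_nonneg (by omega)).symm⟩
    have hN3 : 3 ≤ N := by exact_mod_cast hn
    have hNlen : N ≤ arr.length := by exact_mod_cast hlen
    have halen : (arr.take N).length = N := by simp; omega
    have hane : arr.take N ≠ [] := by
      intro h; rw [h] at halen; simp at halen; omega
    have hslice : PySem.List.slice arr none (some (N : Int)) = arr.take N :=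
      PySem.List.slice_to_natCast ..
    have hnot : ¬ ((N : Int) < 3) := by omega
    simp only [trapRainWater, trapRainWater_alt, hnot, if_false, hslice,
      scan_foldl, List.nil_append]
    apply PySem.List.foldl_congr_mem
    intro acc i hi
    rw [PySem.List.mem_pyRange_one] at hi
    obtain ⟨k, rfl⟩ : ∃ k : Nat, i = (k : Int) :=
      ⟨i.toNat, (Int.toNat_of_nonneg (by omega)).symm⟩
    have hk1 : 1 ≤ k := by exact_mod_cast hi.1
    have hkN : k < N - 1 := by
      have := hi.2; omega
    have hka : k < (arr.take N).length := by rw [halen]; omega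
    have hkarr : k < arr.length := by omega
    -- the three per-index values agree
    have hgi : PySem.List.pyGetD arr (k : Int) 0 = PySem.List.pyGetD (arr.take N) (k : Int) 0 := by
      simp only [PySem.List.pyGetD_natCast]
      rw [List.getD_eq_getElem arr 0 hkarr, List.getD_eq_getElem _ 0 hka,
        List.getElem_take]
    have htakeeq : (arr.take N).take k = arr.take k := by
      rw [List.take_take]; congr 1; omega
    have hgD : (arr.take N).getD k 0 = arr.getD k 0 := by
      rw [List.getD_eq_getElem arr 0 hkarr, List.getD_eq_getElem _ 0 hka,
        List.getElem_take]
    -- LEFT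
    have hleftA : (PySem.List.pyRange 0 (k : Int) 1).foldl
        (fun l j => max l (PySem.List.pyGetD arr j 0)) (PySem.List.pyGetD arr (k : Int) 0)
        = fm (arr.take k) (arr.getD k 0) := by
      rw [PySem.List.pyRange_one, List.foldl_map,
        show (((k : Int)) - 0).toNat = k by omega]
      have harg : ∀ (x : Int) (j : Nat), max x (PySem.List.pyGetD arr ((0 : Int) + (j : Nat)) 0)
          = max x (arr.getD j 0) := by
        intro x j
        rw [show (0 : Int) + (j : Nat) = ((j : Nat) : Int) by ring, PySem.List.pyGetD_natCast]
      simp only [harg, PySem.List.pyGetD_natCast]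
      rw [← List.foldl_map,
        show (fun (j : Nat) => arr.getD j 0) = (fun j => arr.getD (0 + j) 0) by funext j; simp,
        map_getD_range_off arr 0 k (by omega), List.drop_zero, fm]
    have hleftB : (scanSpec ((arr.take N).getD 0 0) (arr.take N)).getD k 0
        = fm (arr.take k) (arr.getD k 0) := by
      rw [List.getD_eq_getElem?_getD, scan_get _ _ k hka]
      show fm ((arr.take N).take (k + 1)) ((arr.take N).getD 0 0) = _
      rw [fm_take_shift _ k hka, htakeeq, hgD]
    -- RIGHT
    have hrightA : (PySem.List.pyRange ((k : Int) + 1) (N : Int) 1).foldl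
        (fun r j => max r (PySem.List.pyGetD arr j 0)) (PySem.List.pyGetD arr (k : Int) 0)
        = fm ((arr.take N).drop (k + 1)) (arr.getD k 0) := by
      rw [PySem.List.pyRange_one, List.foldl_map,
        show (((N : Int)) - ((k : Int) + 1)).toNat = N - (k + 1) by omega]
      have harg : ∀ (x : Int) (j : Nat), max x (PySem.List.pyGetD arr (((k : Int) + 1) + (j : Nat)) 0)
          = max x (arr.getD (k + 1 + j) 0) := by
        intro x j
        rw [show ((k : Int) + 1) + (j : Nat) = ((k + 1 + j : Nat) : Int) by push_cast; ring,
          PySem.List.pyGetD_natCast]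
      simp only [harg, PySem.List.pyGetD_natCast]
      rw [← List.foldl_map,
        map_getD_range_off arr (k + 1) (N - (k + 1)) (by omega), fm, List.drop_take]
    have hlast : PySem.List.pyGetD (arr.take N) (-1) 0 = (arr.take N)[N - 1] := by
      rw [PySem.List.pyGetD_neg_one _ 0 hane, List.getLast_eq_getElem]
      congr 1
      omega
    have hmem : (arr.take N)[N - 1] ∈ (arr.take N).drop (k + 1) := by
      have : (arr.take N)[N - 1] = ((arr.take N).drop (k + 1))[N - 1 - (k + 1)]'(by
        rw [List.length_drop, halen]; omega) := by
        rw [List.getElem_drop]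
        congr 1
        omega
      rw [this]
      exact List.getElem_mem _
    have hrightB : ((scanSpec ((PySem.List.pyGetD (arr.take N) (-1) 0)) (arr.take N).reverse).reverse).getD k 0
        = fm ((arr.take N).drop (k + 1)) (arr.getD k 0) := by
      rw [List.getD_eq_getElem?_getD,
        List.getElem?_reverse (by rw [scanSpec_length, List.length_reverse, halen]; omega)]
      rw [scanSpec_length, List.length_reverse, halen]
      rw [scan_get _ _ (N - 1 - k) (by rw [List.length_reverse, halen]; omega)]
      show fm ((arr.take N).reverse.take (N - 1 - k + 1)) _ = _
      rw [show N - 1 - k + 1 = N - k by omega, List.take_reverse, halen,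
        show N - (N - k) = k by omega, fm_reverse, hlast]
      rw [← List.getElem_cons_drop hka, fm_cons, fm_absorb _ _ _ hmem,
        show (arr.take N)[k] = arr.getD k 0 by rw [← hgD, List.getD_eq_getElem _ 0 hka]]
    rw [hleftA, hrightA, hgi]
    simp only [PySem.List.pyGetD_natCast, PySem.List.pyGetD_zero]
    rw [hleftB, hrightB]

-- ===== VERDICT (by name: the statement is the Claim_ definition above) =====
theorem trapRainWater_spec : Claim_equal_trapRainWater := by
  intro arr n _ hpre
  exact trapRainWater_main arr n hpre
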